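-- pv_equiv track=rewrite | github.com/iagjqkq/EECBS | FRL - EECBS/cactus/controller/lns/lns_operators.py | _calculate_collisions
-- ===== SOURCE A (Python) =====
-- def _calculate_collisions(env, solution_paths):
--     if not solution_paths: return 0
--     num_agents = len(solution_paths)
--     max_len = 0
--     for path in solution_paths.values():
--         if path: max_len = max(max_len, len(path))
--     if max_len == 0: return 0
--     positions_over_time = {}
--     collisions = 0
--     for t in range(max_len):
--         positions_at_t = {}
--         for agent_id, path in solution_paths.items():
--             if t < len(path):
--                 pos = path[t]
--                 if pos in positions_at_t: collisions += 1
--                 positions_at_t[pos] = agent_id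
--         positions_over_time[t] = positions_at_t
--     for t in range(max_len - 1):
--         for agent1, path1 in solution_paths.items():
--             if t + 1 < len(path1):
--                 for agent2, path2 in solution_paths.items():
--                     if agent1 >= agent2: continue
--                     if t + 1 < len(path2):
--                         if path1[t + 1] == path2[t] and path1[t] == path2[t + 1]: collisions += 1
--     return collisions
-- ===== SOURCE B (Python) =====
-- def _calculate_collisions(env, solution_paths):
--     # One pass per timestep: vertex collisions counted as len(list) - len(set),
--     # swap collisions via a hash of moves seen so far, looking up the reverse move.
--     paths = list(solution_paths.values())
--     max_len = max((len(p) for p in paths), default=0)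
--     collisions = 0
--     for t in range(max_len):
--         pts = [p[t] for p in paths if t < len(p)]
--         collisions += len(pts) - len(set(pts))
--         if t + 1 < max_len:
--             rev = {}
--             for p in paths:
--                 if t + 1 < len(p):
--                     mv = (p[t], p[t + 1])
--                     collisions += rev.get((mv[1], mv[0]), 0)
--                     rev[mv] = rev.get(mv, 0) + 1
--     return collisions
-- ===== Notes on version B (the rewrite author's own statement) =====
-- stated objective: faster
-- what changed: B replaces A's O(N^2)-per-timestep double loop over agent pairs by a single pass per timestep that hashes each agent's move and looks up the reverse move, and counts vertex collisions as len(positions) - len(set(positions)) instead of A's incremental dict-membership test.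
import Mathlib
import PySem

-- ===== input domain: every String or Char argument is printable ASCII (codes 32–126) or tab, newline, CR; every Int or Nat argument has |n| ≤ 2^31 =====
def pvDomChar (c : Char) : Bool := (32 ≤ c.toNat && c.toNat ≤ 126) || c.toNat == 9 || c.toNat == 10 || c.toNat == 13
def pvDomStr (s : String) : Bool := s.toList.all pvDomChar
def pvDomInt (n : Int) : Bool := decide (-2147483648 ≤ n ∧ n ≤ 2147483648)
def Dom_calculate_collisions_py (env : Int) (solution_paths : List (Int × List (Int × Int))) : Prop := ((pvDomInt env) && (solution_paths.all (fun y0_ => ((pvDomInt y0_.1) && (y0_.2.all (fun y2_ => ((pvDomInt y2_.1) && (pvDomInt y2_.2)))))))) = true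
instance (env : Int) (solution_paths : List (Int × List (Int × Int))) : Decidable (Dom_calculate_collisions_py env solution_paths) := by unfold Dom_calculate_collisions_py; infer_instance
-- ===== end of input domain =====

-- B replaces A's O(N²) per-timestep swap double loop by a single pass with a hash of the moves
-- seen so far (looking up the reverse move) and counts vertex collisions as len(list)-len(set);
-- objective: faster (O(T·N) instead of O(T·N²)).

-- ===== PORT A =====
-- Port of A ('_calculate_collisions'). The Python dict argument arrives as an association list and is
-- read back through PySem.Dict.ofList. A's `num_agents` and `positions_over_time` are computed but
-- never read, so they are omitted. `path[t]` under the guard `t < len(path)` is ported as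
-- `getD t (0, 0)` (exact: the guard puts the index in range). `range(max_len)` is `List.range max_len`.
def calculate_collisions_py (env : Int) (solution_paths : List (Int × List (Int × Int))) : Int :=
  let d := PySem.Dict.ofList solution_paths
  if d.items = [] then 0
  else
    let max_len : Nat := d.values.foldl (fun m path => if path ≠ [] then max m path.length else m) 0
    if max_len = 0 then 0
    else
      let collisions : Int := (List.range max_len).foldl (fun collisions t =>
        (d.items.foldl
          (fun (s : Int × PySem.Dict (Int × Int) Int) ap =>
            if t < ap.2.length then
              let pos := ap.2.getD t (0, 0)
              ((if s.2.contains pos then s.1 + 1 else s.1), s.2.insert pos ap.1)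
            else s)
          (collisions, PySem.Dict.empty)).1) 0
      (List.range (max_len - 1)).foldl (fun collisions t =>
        d.items.foldl (fun c1 a1 =>
          if t + 1 < a1.2.length then
            d.items.foldl (fun c2 a2 =>
              if a1.1 ≥ a2.1 then c2
              else if t + 1 < a2.2.length then
                if a1.2.getD (t + 1) (0, 0) = a2.2.getD t (0, 0) ∧ a1.2.getD t (0, 0) = a2.2.getD (t + 1) (0, 0) then c2 + 1
                else c2
              else c2) c1
          else c1) collisions) collisions

-- ===== PORT B =====
-- Port of B (Source B): per timestep, vertex collisions are len(pts) - len(set(pts)); swap collisions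
-- come from one pass over the paths keeping a dict `rev` of moves seen so far and adding the count
-- of the reverse move. max(..., default=0) over lengths is the running-max fold.
def calculate_collisions_py_alt (env : Int) (solution_paths : List (Int × List (Int × Int))) : Int :=
  let paths := (PySem.Dict.ofList solution_paths).values
  let max_len : Nat := paths.foldl (fun m p => max m p.length) 0
  (List.range max_len).foldl (fun collisions t =>
    let pts := (paths.filter (fun p => t < p.length)).map (fun p => p.getD t (0, 0))
    let collisions := collisions + (pts.length : Int) - ((PySem.Set.ofList pts).length : Int)
    if t + 1 < max_len then
      (paths.foldl
        (fun (s : Int × PySem.Dict ((Int × Int) × (Int × Int)) Int) p =>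
          if t + 1 < p.length then
            let mv := (p.getD t (0, 0), p.getD (t + 1) (0, 0))
            (s.1 + s.2.getD (mv.2, mv.1) 0, s.2.insert mv (s.2.getD mv 0 + 1))
          else s)
        (collisions, PySem.Dict.empty)).1
    else collisions) 0

-- ===== PRECONDITION & SPEC =====
def Spec_calculate_collisions_py (env : Int) (solution_paths : List (Int × List (Int × Int))) (out : Int) : Prop := out = calculate_collisions_py_alt env solution_paths
instance (env : Int) (solution_paths : List (Int × List (Int × Int))) (out : Int) : Decidable (Spec_calculate_collisions_py env solution_paths out) := by unfold Spec_calculate_collisions_py; infer_instance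

-- ===== CLAIM (what is proved, stated in full; the proofs are below) =====
def Claim_equal_calculate_collisions_py : Prop := ∀ (env : Int) (solution_paths : List (Int × List (Int × Int))), Dom_calculate_collisions_py env solution_paths → Spec_calculate_collisions_py env solution_paths (calculate_collisions_py env solution_paths)

-- ===== LEMMAS AND PROOFS =====

def pvSwp (m : (Int × Int) × (Int × Int)) : (Int × Int) × (Int × Int) := (m.2, m.1)
def pvRc : List ((Int × Int) × (Int × Int)) → Int
  | [] => 0
  | m :: ms => (ms.count (pvSwp m) : Int) + pvRc ms
def pvPc : List ((Int × Int) × (Int × Int)) → List ((Int × Int) × (Int × Int)) → Int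
  | _, [] => 0
  | pre, m :: ms => (pre.count (pvSwp m) : Int) + pvPc (pre ++ [m]) ms
def pvPts (t : Nat) (paths : List (List (Int × Int))) : List (Int × Int) :=
  (paths.filter (fun p => t < p.length)).map (fun p => p.getD t (0, 0))
def pvMoves (t : Nat) (paths : List (List (Int × Int))) : List ((Int × Int) × (Int × Int)) :=
  (paths.filter (fun p => t + 1 < p.length)).map (fun p => (p.getD t (0, 0), p.getD (t + 1) (0, 0)))
def pvVa (t : Nat) (paths : List (List (Int × Int))) : Int :=
  ((pvPts t paths).length : Int) - ((PySem.Set.ofList (pvPts t paths)).length : Int)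
def pvSa (t : Nat) (paths : List (List (Int × Int))) : Int := pvRc (pvMoves t paths)
def pvMb (t : Nat) (a1 a2 : Int × List (Int × Int)) : Bool :=
  decide (a1.2.getD (t + 1) (0, 0) = a2.2.getD t (0, 0) ∧ a1.2.getD t (0, 0) = a2.2.getD (t + 1) (0, 0))
def pvMv (t : Nat) (a : Int × List (Int × Int)) : (Int × Int) × (Int × Int) :=
  (a.2.getD t (0, 0), a.2.getD (t + 1) (0, 0))

theorem pv_keys_insert (d : PySem.Dict (Int × Int) Int) (k : Int × Int) (v : Int) :
    (d.insert k v).keys = PySem.Set.add d.keys k := by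
  have := PySem.Dict.keys_foldl_insert (l := [k]) (f := fun _ _ => v) (d := d)
  simpa [PySem.Set.update] using this

-- A's vertex loop over the items at time t, any starting dict
theorem pv_vertA (t : Nat) (l : List (Int × List (Int × Int))) (c : Int) (d : PySem.Dict (Int × Int) Int) :
    (l.foldl (fun (s : Int × PySem.Dict (Int × Int) Int) ap =>
        if t < ap.2.length then
          ((if s.2.contains (ap.2.getD t (0, 0)) then s.1 + 1 else s.1), s.2.insert (ap.2.getD t (0, 0)) ap.1)
        else s) (c, d)).1
      = c + ((pvPts t (l.map (·.2))).length : Int)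
          - ((PySem.Set.update d.keys (pvPts t (l.map (·.2)))).length : Int) + (d.keys.length : Int) := by
  induction l generalizing c d with
  | nil => simp [pvPts, PySem.Set.update]
  | cons ap l ih =>
    by_cases hg : t < ap.2.length
    · have hpts : pvPts t ((ap :: l).map (·.2)) = ap.2.getD t (0, 0) :: pvPts t (l.map (·.2)) := by
        simp [pvPts, hg]
      simp only [List.foldl_cons, if_pos hg]
      rw [ih, hpts, PySem.Set.update_cons, pv_keys_insert, List.length_cons]
      by_cases h : d.contains (ap.2.getD t (0, 0))
      · have hmem : ap.2.getD t (0, 0) ∈ d.keys := (PySem.Dict.contains_iff_mem_keys d _).mp h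
        have hadd : PySem.Set.add d.keys (ap.2.getD t (0, 0)) = d.keys := by
          simp only [PySem.Set.add, PySem.Set.contains]
          rw [if_pos (List.elem_eq_true_of_mem hmem)]
        rw [if_pos h, hadd]
        push_cast
        ring
      · have hmem : ap.2.getD t (0, 0) ∉ d.keys := fun hm => h ((PySem.Dict.contains_iff_mem_keys d _).mpr hm)
        have hadd : PySem.Set.add d.keys (ap.2.getD t (0, 0)) = d.keys ++ [ap.2.getD t (0, 0)] := by
          simp only [PySem.Set.add, PySem.Set.contains]
          rw [if_neg (by simpa using hmem)]
        rw [if_neg h, hadd, List.length_append, List.length_cons, List.length_nil]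
        push_cast
        ring
    · have hpts : pvPts t ((ap :: l).map (·.2)) = pvPts t (l.map (·.2)) := by
        simp [pvPts, hg]
      rw [hpts]
      simp only [List.foldl_cons, if_neg hg]
      exact ih c d

-- B's swap loop over the paths at step t, dict as a counter of the moves already seen
theorem pv_bswapB (t : Nat) (l : List (List (Int × Int))) (pre : List ((Int × Int) × (Int × Int)))
    (c : Int) (d : PySem.Dict ((Int × Int) × (Int × Int)) Int) (hd : ∀ k, d.getD k 0 = pre.count k) :
    (l.foldl (fun (s : Int × PySem.Dict ((Int × Int) × (Int × Int)) Int) p =>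
        if t + 1 < p.length then
          (s.1 + s.2.getD (p.getD (t + 1) (0, 0), p.getD t (0, 0)) 0,
           s.2.insert (p.getD t (0, 0), p.getD (t + 1) (0, 0))
             (s.2.getD (p.getD t (0, 0), p.getD (t + 1) (0, 0)) 0 + 1))
        else s) (c, d)).1
      = c + pvPc pre (pvMoves t l) := by
  induction l generalizing pre c d with
  | nil => simp [pvMoves, pvPc]
  | cons p l ih =>
    by_cases hg : t + 1 < p.length
    · have hmv : pvMoves t (p :: l) = (p.getD t (0, 0), p.getD (t + 1) (0, 0)) :: pvMoves t l := by
        simp [pvMoves, hg]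
      rw [hmv]
      simp only [List.foldl_cons, if_pos hg]
      rw [ih (pre := pre ++ [(p.getD t (0, 0), p.getD (t + 1) (0, 0))])]
      · show _ = c + pvPc pre (_ :: pvMoves t l)
        rw [pvPc, hd]
        show c + _ + pvPc _ (pvMoves t l) = _
        unfold pvSwp
        ring
      · intro k
        rw [PySem.Dict.getD_insert, hd _, hd k]
        rw [List.count_append, List.count_cons, List.count_nil]
        by_cases hk : k = (p.getD t (0, 0), p.getD (t + 1) (0, 0))
        · subst hk
          rw [if_pos rfl, beq_self_eq_true]
          norm_num
        · rw [if_neg hk, beq_eq_false_iff_ne.mpr (fun he => hk he.symm)]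
          push_cast; ring
    · have hmv : pvMoves t (p :: l) = pvMoves t l := by simp [pvMoves, hg]
      rw [hmv]
      simp only [List.foldl_cons, if_neg hg]
      exact ih pre c d hd

-- A's inner pair loop is a countP
theorem pv_innerA (t : Nat) (a1 : Int × List (Int × Int)) (l : List (Int × List (Int × Int))) (c : Int) :
    (l.foldl (fun c2 a2 =>
        if a1.1 ≥ a2.1 then c2
        else if t + 1 < a2.2.length then
          if a1.2.getD (t + 1) (0, 0) = a2.2.getD t (0, 0) ∧ a1.2.getD t (0, 0) = a2.2.getD (t + 1) (0, 0) then c2 + 1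
          else c2
        else c2) c)
      = c + ((l.countP (fun a2 => decide (a1.1 < a2.1) && (decide (t + 1 < a2.2.length) && pvMb t a1 a2))) : Int) := by
  induction l generalizing c with
  | nil => simp
  | cons a2 l ih =>
    simp only [List.foldl_cons, List.countP_cons]
    by_cases h1 : a1.1 ≥ a2.1
    · have : decide (a1.1 < a2.1) = false := by simp; omega
      rw [if_pos h1, ih]
      simp [this]
    · have hlt : decide (a1.1 < a2.1) = true := by simp; omega
      rw [if_neg h1]
      by_cases h2 : t + 1 < a2.2.length
      · by_cases h3 : a1.2.getD (t + 1) (0, 0) = a2.2.getD t (0, 0) ∧ a1.2.getD t (0, 0) = a2.2.getD (t + 1) (0, 0)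
        · have hmb : pvMb t a1 a2 = true := by rw [pvMb]; exact decide_eq_true h3
          rw [if_pos h2, if_pos h3, ih]
          rw [hlt, hmb]
          simp [h2]
          ring
        · have hmb : pvMb t a1 a2 = false := by rw [pvMb]; exact decide_eq_false h3
          rw [if_pos h2, if_neg h3, ih]
          rw [hmb]
          norm_num
      · rw [if_neg h2, ih]
        have : decide (t + 1 < a2.2.length) = false := by simp; omega
        rw [this]
        norm_num

-- a guarded accumulate loop is a sum over the filtered list
theorem pv_guard_add {α : Type} (l : List α) (p : α → Prop) [DecidablePred p] (w : α → Int) (c : Int) :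
    l.foldl (fun c x => if p x then c + w x else c) c
      = c + ((l.filter (fun x => decide (p x))).map w).sum := by
  induction l generalizing c with
  | nil => simp
  | cons x l ih =>
    simp only [List.foldl_cons, List.filter_cons]
    by_cases h : p x
    · rw [if_pos h, if_pos (by simpa using h), ih]
      simp only [List.map_cons, List.sum_cons]
      ring
    · rw [if_neg h, if_neg (by simpa using h)]
      exact ih c

theorem pv_moves_map (t : Nat) (l : List (Int × List (Int × Int))) :
    pvMoves t (l.map (·.2)) = (l.filter (fun a => decide (t + 1 < a.2.length))).map (pvMv t) := by
  rw [pvMoves, List.filter_map, List.map_map]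
  rfl

theorem pv_range_split (m : Nat) (hm : 0 < m) (g : Nat → Int) :
    ((List.range m).map (fun t => if t + 1 < m then g t else 0)).sum
      = ((List.range (m - 1)).map g).sum := by
  obtain ⟨k, rfl⟩ : ∃ k, m = k + 1 := ⟨m - 1, by omega⟩
  rw [List.range_succ, List.map_append, List.sum_append]
  simp only [List.map_cons, List.map_nil, List.sum_cons, List.sum_nil]
  rw [if_neg (by omega)]
  have : ∀ t ∈ List.range k, (if t + 1 < k + 1 then g t else 0) = g t := by
    intro t ht
    rw [if_pos (by simpa using List.mem_range.mp ht)]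
  rw [List.map_congr_left this]
  simp

theorem pv_maxlen (l : List (List (Int × Int))) (a : Nat) :
    l.foldl (fun m p => if p ≠ [] then max m p.length else m) a = l.foldl (fun m p => max m p.length) a := by
  induction l generalizing a with
  | nil => rfl
  | cons p l ih =>
    simp only [List.foldl_cons]
    rcases p with _ | ⟨x, xs⟩
    · rw [if_neg (by simp), List.length_nil, Nat.max_zero]
      exact ih a
    · rw [if_pos (by simp)]
      exact ih _


theorem pvSwp_swp (m : (Int × Int) × (Int × Int)) : pvSwp (pvSwp m) = m := by simp [pvSwp]

theorem pv_eq_swp_comm (m x : (Int × Int) × (Int × Int)) : m = pvSwp x ↔ x = pvSwp m := by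
  constructor <;> (intro h; subst h; rw [pvSwp_swp])


theorem pv_count_swp (m : (Int × Int) × (Int × Int)) (ms : List ((Int × Int) × (Int × Int))) :
    (ms.map (fun m' => (if m == pvSwp m' then (1 : Int) else 0))).sum = (ms.count (pvSwp m) : Int) := by
  induction ms with
  | nil => simp
  | cons x xs ihx =>
    simp only [List.map_cons, List.sum_cons, List.count_cons, ihx]
    by_cases h : m = pvSwp x
    · have hx : x = pvSwp m := (pv_eq_swp_comm m x).mp h
      have h1 : (m == pvSwp x) = true := beq_iff_eq.mpr h
      have h2 : (x == pvSwp m) = true := beq_iff_eq.mpr hx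
      rw [h1, h2]
      push_cast; ring
    · have hx : ¬ x = pvSwp m := fun hx => h ((pv_eq_swp_comm m x).mpr hx)
      have h1 : (m == pvSwp x) = false := beq_eq_false_iff_ne.mpr h
      have h2 : (x == pvSwp m) = false := beq_eq_false_iff_ne.mpr hx
      rw [h1, h2]
      push_cast; ring

theorem pv_pc_sum (ms : List ((Int × Int) × (Int × Int))) : ∀ pre,
    pvPc pre ms = (ms.map (fun m => (pre.count (pvSwp m) : Int))).sum + pvRc ms := by
  induction ms with
  | nil => simp [pvPc, pvRc]
  | cons m ms ih =>
    intro pre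
    simp only [pvPc, pvRc, List.map_cons, List.sum_cons]
    rw [ih (pre ++ [m])]
    have hc : ∀ m' : ((Int × Int) × (Int × Int)), ((pre ++ [m]).count (pvSwp m') : Int)
        = (pre.count (pvSwp m') : Int) + (if m == pvSwp m' then 1 else 0) := by
      intro m'
      by_cases h : m = pvSwp m' <;> simp [List.count_append, h, Ne.symm]
    simp only [hc]
    rw [PySem.List.sum_map_add_int (f := fun m' => ((pre.count (pvSwp m') : Nat) : Int))
          (g := fun m' => (if m == pvSwp m' then (1 : Int) else 0)), pv_count_swp]
    ring

theorem pv_pc_eq_rc (ms : List ((Int × Int) × (Int × Int))) : pvPc [] ms = pvRc ms := by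
  rw [pv_pc_sum]; simp


theorem pv_countP_add_countP {α : Type} (l : List α) (p q r : α → Bool)
    (h : ∀ y ∈ l, (if p y then 1 else 0) + (if q y then 1 else 0) = (if r y then (1 : Nat) else 0)) :
    l.countP p + l.countP q = l.countP r := by
  induction l with
  | nil => simp
  | cons x xs ih =>
    simp only [List.countP_cons]
    have hx := h x (by simp)
    have hxs := ih (fun y hy => h y (by simp [hy]))
    omega

theorem pvMb_symm (t : Nat) (a1 a2 : Int × List (Int × Int)) : pvMb t a1 a2 = pvMb t a2 a1 := by
  simp only [pvMb, decide_eq_decide]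
  constructor <;> (rintro ⟨h1, h2⟩; exact ⟨h2.symm, h1.symm⟩)

theorem pvMb_iff_mv (t : Nat) (a1 a2 : Int × List (Int × Int)) :
    pvMb t a1 a2 = (pvMv t a2 == pvSwp (pvMv t a1)) := by
  rw [Bool.eq_iff_iff]
  simp only [pvMb, pvMv, pvSwp, decide_eq_true_eq, beq_iff_eq, Prod.ext_iff]
  omega

theorem pv_key_pairs (t : Nat) (l : List (Int × List (Int × Int))) (h : (l.map (·.1)).Nodup) :
    (l.map (fun a1 => ((l.countP (fun a2 => decide (a1.1 < a2.1) && pvMb t a1 a2)) : Int))).sum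
      = pvRc (l.map (pvMv t)) := by
  induction l with
  | nil => simp [pvRc]
  | cons x xs ih =>
    simp only [List.map_cons, List.nodup_cons, List.mem_map] at h
    obtain ⟨hx, hxs⟩ := h
    have hneq : ∀ y ∈ xs, x.1 ≠ y.1 := fun y hy he => hx ⟨y, hy, he.symm⟩
    simp only [List.map_cons, List.sum_cons, pvRc]
    -- split every countP over (x :: xs) into its x-term and its xs-part
    simp only [List.countP_cons]
    have hself : (decide (x.1 < x.1) && pvMb t x x) = false := by simp
    rw [hself]
    push_cast
    rw [PySem.List.sum_map_add_int
          (f := fun a1 => ((xs.countP (fun a2 => decide (a1.1 < a2.1) && pvMb t a1 a2) : Nat) : Int))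
          (g := fun a1 => (if (decide (a1.1 < x.1) && pvMb t a1 x) = true then (1 : Int) else 0))]
    rw [ih hxs]
    have hrev : (xs.map (fun a1 => (if (decide (a1.1 < x.1) && pvMb t a1 x) = true then (1 : Int) else 0))).sum
        = (xs.countP (fun a1 => decide (a1.1 < x.1) && pvMb t a1 x) : Int) := by
      rw [PySem.List.sum_map_ite_one_zero]
    rw [hrev]
    have hsplit : xs.countP (fun a2 => decide (x.1 < a2.1) && pvMb t x a2)
        + xs.countP (fun a1 => decide (a1.1 < x.1) && pvMb t a1 x)
        = xs.countP (fun y => pvMb t x y) := by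
      apply pv_countP_add_countP
      intro y hy
      have hne := hneq y hy
      by_cases hm : pvMb t x y = true
      · have hm' : pvMb t y x = true := by rw [pvMb_symm]; exact hm
        rcases lt_trichotomy x.1 y.1 with hlt | heq | hgt
        · simp [hlt, hm, hm', not_lt_of_gt hlt]
        · exact absurd heq hne
        · simp [hgt, hm, hm', not_lt_of_gt hgt]
      · have hm' : ¬ pvMb t y x = true := by rw [pvMb_symm]; exact hm
        simp [Bool.eq_false_iff.mpr hm, Bool.eq_false_iff.mpr hm']
    have hcount : xs.countP (fun y => pvMb t x y) = (xs.map (pvMv t)).count (pvSwp (pvMv t x)) := by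
      rw [List.count, List.countP_map]
      apply List.countP_congr
      intro y _
      simp only [Function.comp_apply, pvMb_iff_mv]
    have : ((xs.countP fun a2 => decide (x.1 < a2.1) && pvMb t x a2) : Int)
          + ((xs.countP fun a1 => decide (a1.1 < x.1) && pvMb t a1 x) : Int)
        = ((xs.map (pvMv t)).count (pvSwp (pvMv t x)) : Int) := by
      rw [← hcount]
      exact_mod_cast congrArg (Nat.cast (R := Int)) hsplit
    push_cast at this ⊢
    linarith [this]


theorem pvPts_def (t : Nat) (paths : List (List (Int × Int))) :
    (paths.filter (fun p => t < p.length)).map (fun p => p.getD t (0, 0)) = pvPts t paths := rfl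

-- per-timestep value of A's vertex loop
theorem pv_A_vert_step (t : Nat) (l : List (Int × List (Int × Int))) (c : Int) :
    (l.foldl (fun (s : Int × PySem.Dict (Int × Int) Int) ap =>
        if t < ap.2.length then
          ((if s.2.contains (ap.2.getD t (0, 0)) then s.1 + 1 else s.1), s.2.insert (ap.2.getD t (0, 0)) ap.1)
        else s) (c, PySem.Dict.empty)).1
      = c + pvVa t (l.map (·.2)) := by
  rw [pv_vertA]
  rw [show (PySem.Dict.empty : PySem.Dict (Int × Int) Int).keys = [] from rfl]
  rw [PySem.Set.update_nil_left]
  rw [pvVa]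
  simp only [List.length_nil, Nat.cast_zero, add_zero]
  ring

-- per-timestep value of A's swap double loop
theorem pv_A_swap_step (t : Nat) (l : List (Int × List (Int × Int))) (hnd : (l.map (·.1)).Nodup) (c : Int) :
    l.foldl (fun c1 a1 =>
        if t + 1 < a1.2.length then
          l.foldl (fun c2 a2 =>
            if a1.1 ≥ a2.1 then c2
            else if t + 1 < a2.2.length then
              if a1.2.getD (t + 1) (0, 0) = a2.2.getD t (0, 0) ∧ a1.2.getD t (0, 0) = a2.2.getD (t + 1) (0, 0) then c2 + 1
              else c2
            else c2) c1
        else c1) c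
      = c + pvSa t (l.map (·.2)) := by
  have hinner : ∀ (c1 : Int) (a1 : Int × List (Int × Int)), a1 ∈ l →
      (if t + 1 < a1.2.length then
        l.foldl (fun c2 a2 =>
          if a1.1 ≥ a2.1 then c2
          else if t + 1 < a2.2.length then
            if a1.2.getD (t + 1) (0, 0) = a2.2.getD t (0, 0) ∧ a1.2.getD t (0, 0) = a2.2.getD (t + 1) (0, 0) then c2 + 1
            else c2
          else c2) c1
      else c1)
      = (if t + 1 < a1.2.length then
          c1 + ((l.countP (fun a2 => decide (a1.1 < a2.1) && (decide (t + 1 < a2.2.length) && pvMb t a1 a2))) : Int)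
        else c1) := by
    intro c1 a1 _
    by_cases hg : t + 1 < a1.2.length
    · rw [if_pos hg, if_pos hg, pv_innerA]
    · rw [if_neg hg, if_neg hg]
  rw [PySem.List.foldl_congr_mem _ _ _ _ hinner]
  rw [pv_guard_add]
  -- move the inner countP to the filtered list
  have hcnt : ∀ a1, ((l.countP (fun a2 => decide (a1.1 < a2.1) && (decide (t + 1 < a2.2.length) && pvMb t a1 a2))) : Int)
      = (((l.filter (fun a => decide (t + 1 < a.2.length))).countP
          (fun a2 => decide (a1.1 < a2.1) && pvMb t a1 a2)) : Int) := by
    intro a1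
    rw [List.countP_filter]
    congr 1
    apply List.countP_congr
    intro y _
    cases decide (a1.1 < y.1) <;> cases decide (t + 1 < y.2.length) <;> cases pvMb t a1 y <;> rfl
  rw [List.map_congr_left (fun a1 _ => hcnt a1)]
  have hnd' : ((l.filter (fun a => decide (t + 1 < a.2.length))).map (·.1)).Nodup :=
    List.Nodup.sublist (List.Sublist.map _ List.filter_sublist) hnd
  rw [pv_key_pairs t _ hnd']
  rw [pvSa, pv_moves_map]

-- per-timestep value of B's loop body
theorem pv_B_step (t m : Nat) (paths : List (List (Int × Int))) (c : Int) :
    (if t + 1 < m then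
      (paths.foldl
        (fun (s : Int × PySem.Dict ((Int × Int) × (Int × Int)) Int) p =>
          if t + 1 < p.length then
            (s.1 + s.2.getD (p.getD (t + 1) (0, 0), p.getD t (0, 0)) 0,
             s.2.insert (p.getD t (0, 0), p.getD (t + 1) (0, 0))
               (s.2.getD (p.getD t (0, 0), p.getD (t + 1) (0, 0)) 0 + 1))
          else s)
        (c + ((pvPts t paths).length : Int) - ((PySem.Set.ofList (pvPts t paths)).length : Int), PySem.Dict.empty)).1
    else c + ((pvPts t paths).length : Int) - ((PySem.Set.ofList (pvPts t paths)).length : Int))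
      = c + (pvVa t paths + if t + 1 < m then pvSa t paths else 0) := by
  by_cases hm : t + 1 < m
  · rw [if_pos hm, if_pos hm]
    rw [pv_bswapB t paths [] _ PySem.Dict.empty (fun k => rfl)]
    rw [pv_pc_eq_rc, pvVa, ← pvSa]
    ring
  · rw [if_neg hm, if_neg hm, pvVa]
    ring

-- ===== VERDICT (by name: the statement is the Claim_ definition above) =====
theorem calculate_collisions_py_spec : Claim_equal_calculate_collisions_py := by
  intro env sp _hdom
  show calculate_collisions_py env sp = calculate_collisions_py_alt env sp
  simp only [calculate_collisions_py, calculate_collisions_py_alt]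
  have hvals : (PySem.Dict.ofList sp).values = (PySem.Dict.ofList sp).items.map (·.2) := rfl
  by_cases h0 : (PySem.Dict.ofList sp).items = []
  · rw [if_pos h0]
    rw [hvals, h0]
    simp
  · rw [if_neg h0]
    rw [pv_maxlen]
    by_cases hm0 : (PySem.Dict.ofList sp).values.foldl (fun m p => max m p.length) 0 = 0
    · rw [if_pos hm0, hm0]
      simp
    · rw [if_neg hm0]
      set items := (PySem.Dict.ofList sp).items with hitems
      set m := (PySem.Dict.ofList sp).values.foldl (fun m p => max m p.length) 0 with hmdef
      have hnd : (items.map (·.1)).Nodup := PySem.Dict.nodup_keys_ofList sp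
      -- A's vertex total
      have hAv : (List.range m).foldl (fun collisions t =>
            (items.foldl (fun (s : Int × PySem.Dict (Int × Int) Int) ap =>
              if t < ap.2.length then
                ((if s.2.contains (ap.2.getD t (0, 0)) then s.1 + 1 else s.1), s.2.insert (ap.2.getD t (0, 0)) ap.1)
              else s) (collisions, PySem.Dict.empty)).1) 0
          = 0 + ((List.range m).map (fun t => pvVa t (items.map (·.2)))).sum := by
        rw [PySem.List.foldl_congr_mem _ _ _ _ (fun (acc : Int) t (_ : t ∈ List.range m) => pv_A_vert_step t items acc)]
        rw [PySem.List.foldl_add]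
      -- A's swap total
      have hAs : ∀ c : Int, (List.range (m - 1)).foldl (fun collisions t =>
            items.foldl (fun c1 a1 =>
              if t + 1 < a1.2.length then
                items.foldl (fun c2 a2 =>
                  if a1.1 ≥ a2.1 then c2
                  else if t + 1 < a2.2.length then
                    if a1.2.getD (t + 1) (0, 0) = a2.2.getD t (0, 0) ∧ a1.2.getD t (0, 0) = a2.2.getD (t + 1) (0, 0) then c2 + 1
                    else c2
                  else c2) c1
              else c1) collisions) c
          = c + ((List.range (m - 1)).map (fun t => pvSa t (items.map (·.2)))).sum := by
        intro c
        rw [PySem.List.foldl_congr_mem _ _ _ _ (fun (acc : Int) t (_ : t ∈ List.range (m - 1)) => pv_A_swap_step t items hnd acc)]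
        rw [PySem.List.foldl_add]
      rw [hAv, hAs]
      -- B's total
      simp only [pvPts_def]
      have hB : (List.range m).foldl (fun collisions t =>
            if t + 1 < m then
              ((PySem.Dict.ofList sp).values.foldl
                (fun (s : Int × PySem.Dict ((Int × Int) × (Int × Int)) Int) p =>
                  if t + 1 < p.length then
                    (s.1 + s.2.getD (p.getD (t + 1) (0, 0), p.getD t (0, 0)) 0,
                     s.2.insert (p.getD t (0, 0), p.getD (t + 1) (0, 0))
                       (s.2.getD (p.getD t (0, 0), p.getD (t + 1) (0, 0)) 0 + 1))
                  else s)
                (collisions + ((pvPts t (PySem.Dict.ofList sp).values).length : Int)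
                  - ((PySem.Set.ofList (pvPts t (PySem.Dict.ofList sp).values)).length : Int), PySem.Dict.empty)).1
            else collisions + ((pvPts t (PySem.Dict.ofList sp).values).length : Int)
                  - ((PySem.Set.ofList (pvPts t (PySem.Dict.ofList sp).values)).length : Int)) 0
          = 0 + ((List.range m).map (fun t =>
              pvVa t ((PySem.Dict.ofList sp).values) + if t + 1 < m then pvSa t ((PySem.Dict.ofList sp).values) else 0)).sum := by
        rw [PySem.List.foldl_congr_mem _ _ _ _ (fun (acc : Int) t (_ : t ∈ List.range m) => pv_B_step t m (PySem.Dict.ofList sp).values acc)]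
        rw [PySem.List.foldl_add]
      rw [hB]
      rw [PySem.List.sum_map_add_int (f := fun t => pvVa t ((PySem.Dict.ofList sp).values))
            (g := fun t => if t + 1 < m then pvSa t ((PySem.Dict.ofList sp).values) else 0)]
      rw [pv_range_split m (by omega) (fun t => pvSa t ((PySem.Dict.ofList sp).values))]
      rw [hvals]
      ring
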